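-- pv_equiv track=rewrite | github.com/nikhilhassija/CompetitiveProgramming | Google/foobar/level2a.py | answer
-- ===== SOURCE A (Python) =====
-- def answer(l, t):
-- 	n = len(l)
--
-- 	ans_b = False
-- 	ans_t = [-1, -1]
--
-- 	for i in range(n):
-- 		for j in range(i, n):
-- 			cur = l[i:(j+1)]
-- 			cur_t = [i, j]
--
-- 			if sum(cur) == t:
-- 				if not ans_b:
-- 					ans_b = True
-- 					ans_t = cur_t
--
-- 				ans_t = min(ans_t, cur_t)
--
-- 	return ans_t
-- ===== SOURCE B (Python) =====
-- def answer(l, t):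
--     # One right-to-left pass with a hashmap of suffix sums: for each start i,
--     # the earliest end j with sum(l[i:j+1]) == t is found via first[s_i - t].
--     first = {}        # suffix-sum value -> smallest index where that suffix starts
--     best = [-1, -1]
--     s = 0             # sum of l[i+1:]
--     i = len(l) - 1
--     for x in reversed(l):
--         first[s] = i + 1
--         s += x
--         k = first.get(s - t)
--         if k is not None:
--             best = [i, k - 1]
--         i -= 1
--     return best
-- ===== Notes on version B (the rewrite author's own statement) =====
-- stated objective: faster
-- what changed: Replaced the triple-nested scan over all (i,j) subarrays (slice+sum per pair) with a single right-to-left pass keeping a running suffix sum and a hashmap from suffix-sum value to its earliest start index, which yields the lexicographically smallest matching index pair directly.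
import Mathlib
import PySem

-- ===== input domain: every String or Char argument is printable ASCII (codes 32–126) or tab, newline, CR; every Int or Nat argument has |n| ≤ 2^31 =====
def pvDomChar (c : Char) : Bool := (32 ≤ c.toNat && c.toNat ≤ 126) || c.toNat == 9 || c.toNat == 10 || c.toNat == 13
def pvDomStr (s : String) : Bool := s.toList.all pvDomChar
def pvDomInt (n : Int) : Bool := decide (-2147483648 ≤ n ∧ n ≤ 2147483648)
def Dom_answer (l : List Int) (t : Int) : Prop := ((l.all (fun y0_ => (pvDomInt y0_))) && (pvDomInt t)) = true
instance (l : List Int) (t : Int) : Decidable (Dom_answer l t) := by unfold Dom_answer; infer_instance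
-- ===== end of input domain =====

-- B replaces A's triple-nested all-subarray scan by one right-to-left pass with a
-- running suffix sum and a hashmap of earliest suffix-start per sum value (objective: faster).

-- ===== PORT A =====
-- Python's list comparison a < b on lists of ints (lexicographic)
def pyListLt : List Int → List Int → Bool
  | _, [] => false
  | [], _ :: _ => true
  | a :: as, b :: bs => if a < b then true else if b < a then false else pyListLt as bs

-- Python's min(a, b): b iff b < a, else a
def pyMinL (a b : List Int) : List Int := if pyListLt b a then b else a

-- body of A's inner loop, for the pair (i, j)
def stepA (l : List Int) (t : Int) (st : Bool × List Int) (p : Int × Int) : Bool × List Int :=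
  let cur := PySem.List.slice l (some p.1) (some (p.2 + 1))
  let cur_t : List Int := [p.1, p.2]
  if cur.sum == t then
    let st' := if !st.1 then (true, cur_t) else st
    (st'.1, pyMinL st'.2 cur_t)
  else st

def answer (l : List Int) (t : Int) : List Int :=
  let n : Int := (l.length : Int)
  ((PySem.List.pyRange 0 n 1).foldl
    (fun st i => (PySem.List.pyRange i n 1).foldl (fun st j => stepA l t st (i, j)) st)
    (false, [-1, -1])).2

-- ===== PORT B =====
-- body of B's loop; state = (first, best, s, i)
def stepB (t : Int) (st : PySem.Dict Int Int × List Int × Int × Int) (x : Int) :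
    PySem.Dict Int Int × List Int × Int × Int :=
  let first := st.1.insert st.2.2.1 (st.2.2.2 + 1)
  let s := st.2.2.1 + x
  let best := match first.get? (s - t) with
    | some k => [st.2.2.2, k - 1]
    | none => st.2.1
  (first, best, s, st.2.2.2 - 1)

def answer_alt (l : List Int) (t : Int) : List Int :=
  (l.reverse.foldl (stepB t)
    (PySem.Dict.empty, ([-1, -1] : List Int), (0 : Int), (l.length : Int) - 1)).2.1

-- ===== PRECONDITION & SPEC =====
def Spec_answer (l : List Int) (t : Int) (out : List Int) : Prop := out = answer_alt l t
instance (l : List Int) (t : Int) (out : List Int) : Decidable (Spec_answer l t out) := by unfold Spec_answer; infer_instance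

-- ===== CLAIM (what is proved, stated in full; the proofs are below) =====
def Claim_equal_answer : Prop := ∀ (l : List Int) (t : Int), Dom_answer l t → Spec_answer l t (answer l t)

-- ===== LEMMAS AND PROOFS =====

-- common specification layer -------------------------------------------------
-- first j with sum l[0..j] = t
def firstJ : List Int → Int → Option Nat
  | [], _ => none
  | x :: xs, t => if x = t then some 0 else (firstJ xs (t - x)).map (· + 1)

-- lexicographically least (i, j) with sum l[i..j] = t
def lexFind : List Int → Int → Option (Nat × Nat)
  | [], _ => none
  | x :: xs, t =>
    match firstJ (x :: xs) t with
    | some j => some (0, j)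
    | none => (lexFind xs t).map (fun p => (p.1 + 1, p.2 + 1))

def enc : Option (Nat × Nat) → List Int
  | some (i, j) => [(i : Int), (j : Int)]
  | none => [-1, -1]

-- least r with (m.drop (r+1)).sum = v
def firstDrop : List Int → Int → Option Nat
  | [], _ => none
  | _ :: xs, v => if xs.sum = v then some 0 else (firstDrop xs v).map (· + 1)

lemma firstDrop_sum (m : List Int) : ∀ t : Int, firstDrop m (m.sum - t) = firstJ m t := by
  induction m with
  | nil => intro t; rfl
  | cons x xs ih =>
    intro t
    simp only [firstDrop, firstJ, List.sum_cons]
    by_cases h : x = t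
    · rw [if_pos (by omega), if_pos h]
    · rw [if_neg (by omega), if_neg h, show x + xs.sum - t = xs.sum - (t - x) by ring, ih]

-- A-side ---------------------------------------------------------------------
def matchP (l : List Int) (t : Int) (p : Int × Int) : Bool :=
  (PySem.List.slice l (some p.1) (some (p.2 + 1))).sum == t

def pairLt (a b : Int × Int) : Prop := a.1 < b.1 ∨ (a.1 = b.1 ∧ a.2 < b.2)

def pairs (l : List Int) : List (Int × Int) :=
  (PySem.List.pyRange 0 (l.length : Int) 1).flatMap
    (fun i => (PySem.List.pyRange i (l.length : Int) 1).map (fun j => (i, j)))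

lemma foldl_flatMap {α β γ : Type} (l : List α) (g : α → List β) (f : γ → β → γ) (i : γ) :
    (l.flatMap g).foldl f i = l.foldl (fun s x => (g x).foldl f s) i := by
  induction l generalizing i with
  | nil => rfl
  | cons a l ih => simp [List.flatMap_cons, List.foldl_append, ih]

lemma answer_eq_fold_pairs (l : List Int) (t : Int) :
    answer l t = ((pairs l).foldl (stepA l t) (false, [-1, -1])).2 := by
  unfold answer pairs
  rw [foldl_flatMap]
  simp only [List.foldl_map]

lemma stepA_of_not {l : List Int} {t : Int} {st : Bool × List Int} {p : Int × Int}
    (hm : matchP l t p = false) : stepA l t st p = st := by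
  unfold matchP at hm
  unfold stepA
  simp only [hm, Bool.false_eq_true, if_false]

lemma stepA_of_match {l : List Int} {t : Int} {st : Bool × List Int} {p : Int × Int}
    (hm : matchP l t p = true) :
    stepA l t st p = (true, pyMinL (if st.1 then st.2 else [p.1, p.2]) [p.1, p.2]) := by
  unfold matchP at hm
  unfold stepA
  simp only [hm, if_true]
  cases hst : st.1 <;> simp [hst]

lemma foldA_true (l : List Int) (t : Int) (P : List (Int × Int)) (a b : Int)
    (h : ∀ p ∈ P, pyListLt [p.1, p.2] [a, b] = false) :
    P.foldl (stepA l t) (true, [a, b]) = (true, [a, b]) := by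
  induction P with
  | nil => rfl
  | cons p P ih =>
    have hp := h p (by simp)
    have hstep : stepA l t (true, [a, b]) p = (true, [a, b]) := by
      cases hm : matchP l t p with
      | false => exact stepA_of_not hm
      | true => rw [stepA_of_match hm]; simp [pyMinL, hp]
    rw [List.foldl_cons, hstep]
    exact ih (fun q hq => h q (by simp [hq]))

lemma pyListLt_of_pairLt {a b : Int × Int} (h : pairLt a b) :
    pyListLt [b.1, b.2] [a.1, a.2] = false := by
  rcases h with h | ⟨h1, h2⟩ <;> simp [pyListLt] <;> omega

lemma foldA_false (l : List Int) (t : Int) (P : List (Int × Int)) (h : P.Pairwise pairLt) :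
    P.foldl (stepA l t) (false, [-1, -1]) =
      match P.find? (matchP l t) with
      | some p => (true, [p.1, p.2])
      | none => (false, [-1, -1]) := by
  induction P with
  | nil => rfl
  | cons p P ih =>
    rcases List.pairwise_cons.1 h with ⟨hp, hP⟩
    rw [List.foldl_cons, List.find?_cons]
    cases hm : matchP l t p with
    | false => rw [stepA_of_not hm]; exact ih hP
    | true =>
      rw [stepA_of_match hm]
      have : (if (false, ([-1, -1] : List Int)).1 then (false, ([-1, -1] : List Int)).2
          else [p.1, p.2]) = [p.1, p.2] := by simp
      rw [this]
      simp only [pyMinL, ite_self]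
      exact foldA_true l t P p.1 p.2 (fun q hq => pyListLt_of_pairLt (hp q hq))

lemma pairs_pairwise (l : List Int) : (pairs l).Pairwise pairLt := by
  unfold pairs
  rw [List.pairwise_flatMap]
  constructor
  · intro a _
    rw [List.pairwise_map]
    exact (PySem.List.pairwise_lt_pyRange_one a (l.length : Int)).imp
      (fun h => Or.inr ⟨rfl, h⟩)
  · refine (PySem.List.pairwise_lt_pyRange_one 0 (l.length : Int)).imp ?_
    intro a b hab x hx y hy
    rcases List.mem_map.1 hx with ⟨j1, _, rfl⟩
    rcases List.mem_map.1 hy with ⟨j2, _, rfl⟩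
    exact Or.inl hab

lemma find?_congr_mem {α : Type} (l : List α) (p q : α → Bool) (h : ∀ a ∈ l, p a = q a) :
    l.find? p = l.find? q := by
  induction l with
  | nil => rfl
  | cons x xs ih =>
    simp only [List.find?_cons]
    rw [h x (by simp)]
    cases q x
    · exact ih (fun a ha => h a (by simp [ha]))
    · rfl

lemma pyRange_succ_shift (a b : Int) :
    PySem.List.pyRange (a + 1) (b + 1) 1 = (PySem.List.pyRange a b 1).map (fun j => j + 1) := by
  rw [PySem.List.pyRange_one, PySem.List.pyRange_one,
    show (b + 1 - (a + 1)).toNat = (b - a).toNat from by omega, List.map_map]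
  exact List.map_congr_left (fun k _ => by simp [Function.comp]; ring)

lemma match_cons_shift (x : Int) (xs : List Int) (t i j : Int) (hi : 0 ≤ i) (hj : i ≤ j) :
    matchP (x :: xs) t (i + 1, j + 1) = matchP xs t (i, j) := by
  simp only [matchP]
  rw [PySem.List.slice_toNat _ (by omega) (by omega), PySem.List.slice_toNat _ (by omega) (by omega),
    show (i + 1).toNat = i.toNat + 1 from by omega, List.drop_succ_cons,
    show (j + 1 + 1).toNat - (i.toNat + 1) = (j + 1).toNat - i.toNat from by omega]

lemma match_zero_shift (x : Int) (xs : List Int) (t j : Int) (hj : 0 ≤ j) :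
    matchP (x :: xs) t (0, j + 1) = matchP xs (t - x) (0, j) := by
  simp only [matchP, PySem.List.slice_zero_start]
  rw [PySem.List.slice_to _ (by omega), PySem.List.slice_to _ (by omega),
    show (j + 1 + 1).toNat = (j + 1).toNat + 1 from by omega, List.take_succ_cons, List.sum_cons]
  by_cases h : (xs.take (j + 1).toNat).sum = t - x
  · rw [h]; simp
  · rw [Bool.eq_iff_iff]; simp; omega

lemma find?_row (l : List Int) : ∀ t : Int,
    (PySem.List.pyRange 0 (l.length : Int) 1).find? (fun j => matchP l t (0, j)) =
      (firstJ l t).map (fun j : Nat => (j : Int)) := by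
  induction l with
  | nil =>
    intro t
    simp [PySem.List.pyRange_one_eq_nil, firstJ]
  | cons x xs ih =>
    intro t
    rw [PySem.List.pyRange_one_cons (by exact_mod_cast Nat.succ_pos xs.length), List.find?_cons]
    have h0 : matchP (x :: xs) t (0, 0) = (x == t) := by
      simp only [matchP, PySem.List.slice_zero_start]
      rw [PySem.List.slice_to _ (by omega)]
      norm_num
    rw [h0]
    by_cases hx : x = t
    · simp [hx, firstJ]
    · have hxt : (x == t) = false := by simp [hx]
      rw [hxt]
      show List.find? _ _ = _
      have hlen : ((x :: xs).length : Int) = (xs.length : Int) + 1 := by simp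
      rw [hlen, show (0 : Int) + 1 = 0 + 1 from rfl, pyRange_succ_shift 0 (xs.length : Int),
        List.find?_map]
      rw [find?_congr_mem _ _ (fun j => matchP xs (t - x) (0, j)) (by
        intro j hj
        have hj0 : 0 ≤ j := (PySem.List.mem_pyRange_one.1 hj).1
        exact match_zero_shift x xs t j hj0)]
      rw [ih (t - x)]
      simp only [firstJ, if_neg hx]
      cases firstJ xs (t - x) with
      | none => rfl
      | some r => simp

lemma mem_pairs {l : List Int} {p : Int × Int} (h : p ∈ pairs l) : 0 ≤ p.1 ∧ p.1 ≤ p.2 := by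
  unfold pairs at h
  rcases List.mem_flatMap.1 h with ⟨i, hi, hp⟩
  rcases List.mem_map.1 hp with ⟨j, hj, rfl⟩
  exact ⟨(PySem.List.mem_pyRange_one.1 hi).1, (PySem.List.mem_pyRange_one.1 hj).1⟩

lemma pairs_cons (x : Int) (xs : List Int) :
    pairs (x :: xs) =
      ((PySem.List.pyRange 0 ((x :: xs).length : Int) 1).map (fun j => ((0 : Int), j))) ++
        (pairs xs).map (fun p => (p.1 + 1, p.2 + 1)) := by
  unfold pairs
  conv_lhs => rw [PySem.List.pyRange_one_cons (by exact_mod_cast Nat.succ_pos xs.length),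
    List.flatMap_cons]
  congr 1
  rw [show ((x :: xs).length : Int) = (xs.length : Int) + 1 from by simp,
    show (0 : Int) + 1 = 0 + 1 from rfl, pyRange_succ_shift, List.flatMap_map]
  rw [List.flatMap_congr (l := PySem.List.pyRange 0 (xs.length : Int) 1)
      (g := fun i => ((PySem.List.pyRange i (xs.length : Int) 1).map (fun j => (i, j))).map
        (fun p : Int × Int => (p.1 + 1, p.2 + 1)))
      (by
        intro i _
        show (PySem.List.pyRange (i + 1) ((xs.length : Int) + 1) 1).map (fun j => (i + 1, j)) = _
        rw [pyRange_succ_shift]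
        simp [List.map_map, Function.comp])]
  rw [← List.map_flatMap]

lemma find?_pairs (l : List Int) : ∀ t : Int,
    (pairs l).find? (matchP l t) =
      (lexFind l t).map (fun p : Nat × Nat => ((p.1 : Int), (p.2 : Int))) := by
  induction l with
  | nil =>
    intro t
    simp [pairs, PySem.List.pyRange_one_eq_nil, lexFind]
  | cons x xs ih =>
    intro t
    rw [pairs_cons, List.find?_append, List.find?_map]
    have hrow : (PySem.List.pyRange 0 ((x :: xs).length : Int) 1).find?
        ((matchP (x :: xs) t) ∘ (fun j => ((0 : Int), j)))
        = (firstJ (x :: xs) t).map (fun j : Nat => (j : Int)) := by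
      rw [show (matchP (x :: xs) t) ∘ (fun j => ((0 : Int), j))
        = fun j => matchP (x :: xs) t (0, j) from rfl]
      exact find?_row (x :: xs) t
    rw [hrow, List.find?_map,
      find?_congr_mem _ _ (matchP xs t) (fun p hp => by
        obtain ⟨h1, h2⟩ := mem_pairs hp
        show matchP (x :: xs) t (p.1 + 1, p.2 + 1) = matchP xs t p
        rw [match_cons_shift x xs t p.1 p.2 h1 h2]),
      ih t]
    simp only [lexFind]
    cases hj : firstJ (x :: xs) t with
    | some j => simp
    | none =>
      simp only [Option.map_none, Option.none_or]
      cases lexFind xs t with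
      | none => rfl
      | some p =>
        obtain ⟨i, j⟩ := p
        simp

lemma answer_eq_enc (l : List Int) (t : Int) : answer l t = enc (lexFind l t) := by
  rw [answer_eq_fold_pairs, foldA_false l t _ (pairs_pairwise l), find?_pairs]
  cases h : lexFind l t with
  | none => rfl
  | some p => rfl

-- B-side ---------------------------------------------------------------------
def encShift (b : Int) : Option (Nat × Nat) → List Int
  | some (i, j) => [b + (i : Int), b + (j : Int)]
  | none => [-1, -1]

lemma foldB_spec (t : Int) : ∀ (m : List Int) (b : Int),
    ∃ d : PySem.Dict Int Int,
      m.foldr (fun x st => stepB t st x)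
          (PySem.Dict.empty, ([-1, -1] : List Int), (0 : Int), b + (m.length : Int) - 1)
        = (d, encShift b (lexFind m t), m.sum, b - 1)
      ∧ ∀ v : Int, d.get? v = (firstDrop m v).map (fun r : Nat => b + (r : Int) + 1) := by
  intro m
  induction m with
  | nil =>
    intro b
    refine ⟨PySem.Dict.empty, ?_, ?_⟩
    · show (_, _, _, b + ((0:Nat) : Int) - 1) = _
      norm_num [lexFind, encShift]
    · intro v
      simp [firstDrop, PySem.Dict.get?_empty]
  | cons x m' ih =>
    intro b
    have harith : b + (((x :: m').length : Nat) : Int) - 1 = (b + 1) + ((m'.length : Nat) : Int) - 1 := by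
      simp only [List.length_cons]; push_cast; ring
    rw [List.foldr_cons, harith]
    obtain ⟨d', h1, h2⟩ := ih (b + 1)
    rw [show b + 1 - 1 = b by ring] at h1
    rw [h1]
    have hg : ∀ v : Int, (d'.insert m'.sum (b + 1)).get? v
        = (firstDrop (x :: m') v).map (fun r : Nat => b + (r : Int) + 1) := by
      intro v
      rw [PySem.Dict.get?_insert, h2]
      simp only [firstDrop]
      by_cases hv : v = m'.sum
      · rw [if_pos hv, if_pos hv.symm]
        simp
      · rw [if_neg hv, if_neg (fun h => hv h.symm), Option.map_map]
        cases firstDrop m' v with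
        | none => rfl
        | some r => simp [Function.comp]; ring
    have hbest : (match (d'.insert m'.sum (b + 1)).get? (m'.sum + x - t) with
        | some k => ([b, k - 1] : List Int)
        | none => encShift (b + 1) (lexFind m' t)) = encShift b (lexFind (x :: m') t) := by
      rw [hg, show m'.sum + x - t = (x :: m').sum - t by simp; ring, firstDrop_sum]
      cases hj : firstJ (x :: m') t with
      | some j =>
        simp only [lexFind, hj, Option.map_some, encShift]
        norm_num
      | none =>
        simp only [lexFind, hj, Option.map_none]
        cases hl : lexFind m' t with
        | none => rfl
        | some p =>
          obtain ⟨i, j⟩ := p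
          simp only [Option.map_some, encShift, List.cons.injEq]
          refine ⟨by push_cast; ring, by push_cast; ring, trivial⟩
    refine ⟨d'.insert m'.sum (b + 1), ?_, hg⟩
    show stepB t (d', encShift (b + 1) (lexFind m' t), m'.sum, b) x = _
    simp only [stepB]
    rw [hbest, show m'.sum + x = (x :: m').sum from by simp [add_comm]]

lemma answer_alt_eq_enc (l : List Int) (t : Int) : answer_alt l t = enc (lexFind l t) := by
  unfold answer_alt
  rw [List.foldl_reverse, show ((l.length : Nat) : Int) - 1 = 0 + ((l.length : Nat) : Int) - 1 by ring]
  obtain ⟨d, h1, _⟩ := foldB_spec t l 0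
  rw [h1]
  cases h : lexFind l t with
  | none => rfl
  | some p => obtain ⟨i, j⟩ := p; simp [encShift, enc]

-- ===== VERDICT (by name: the statement is the Claim_ definition above) =====
theorem answer_spec : Claim_equal_answer := by
  intro l t _
  unfold Spec_answer
  rw [answer_eq_enc, answer_alt_eq_enc]
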